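-- pv_equiv track=rewrite | github.com/lokeshsharma99/quality-autopilot | agents/judge/tools.py | check_traceability
-- ===== SOURCE A (Python) =====
-- def check_traceability(gherkin_content: str) -> dict:
--     """Check if the Gherkin spec has traceability to source ticket.
--
--     Args:
--         gherkin_content: The Gherkin feature file content
--
--     Returns:
--         Dictionary with traceability analysis (has_traceability, ticket_id_found)
--     """
--     ticket_id_found = False
--
--     lines = gherkin_content.split('\n')
--
--     for line in lines:
--         stripped = line.strip()
--
--         # Look for ticket ID in comments or tags
--         if '@' in stripped or 'ticket' in stripped.lower() or 'QA-' in stripped: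
--             ticket_id_found = True
--             break
--
--     return {
--         "has_traceability": ticket_id_found,
--         "ticket_id_found": ticket_id_found,
--     }
-- ===== SOURCE B (Python) =====
-- def check_traceability(gherkin_content: str) -> dict:
--     """Check if the Gherkin spec has traceability to source ticket.
--
--     Whole-string test: none of the markers can span a line boundary and
--     stripping lines never affects substring membership, so one disjunction
--     over the full content replaces the per-line loop.
--     """
--     found = ('@' in gherkin_content
--              or 'ticket' in gherkin_content.lower()
--              or 'QA-' in gherkin_content)
--     return {
--         "has_traceability": found,
--         "ticket_id_found": found,
--     }
-- ===== Notes on version B (the rewrite author's own statement) =====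
-- stated objective: simpler
-- what changed: Replaces the split-into-lines loop with strip/lower per line and break by a single closed-form disjunction of three substring tests on the whole content (valid because no marker contains a newline or whitespace, so line splitting and stripping cannot affect membership).
import Mathlib
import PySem

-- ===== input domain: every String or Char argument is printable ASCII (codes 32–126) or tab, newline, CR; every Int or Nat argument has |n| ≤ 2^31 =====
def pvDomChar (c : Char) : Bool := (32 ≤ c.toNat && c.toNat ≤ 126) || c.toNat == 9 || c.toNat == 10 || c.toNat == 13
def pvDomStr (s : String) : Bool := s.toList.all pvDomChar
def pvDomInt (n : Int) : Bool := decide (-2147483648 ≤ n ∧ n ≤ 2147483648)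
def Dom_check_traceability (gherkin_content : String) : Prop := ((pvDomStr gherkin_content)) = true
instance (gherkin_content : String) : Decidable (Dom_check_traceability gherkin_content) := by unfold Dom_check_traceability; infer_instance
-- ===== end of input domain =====

-- B changes A's per-line strip/lower/break loop into one whole-string disjunction (simpler; equal on all inputs).

-- ===== PORT A =====
-- the 'for line in lines: … break' loop: returns as soon as a line matches
def pvLoopA : List String → Bool
  | [] => false
  | line :: rest =>
    let stripped := PySem.Str.strip line
    if PySem.Str.isIn "@" stripped || PySem.Str.isIn "ticket" (PySem.Str.lower stripped)
        || PySem.Str.isIn "QA-" stripped then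
      true
    else
      pvLoopA rest

def check_traceability (gherkin_content : String) : List (String × Bool) :=
  -- split('\n') with a nonempty separator never raises: split? is `some` here, getD's default is unreachable
  let lines := (PySem.Str.split? gherkin_content "\n").getD []
  let ticket_id_found := pvLoopA lines
  [("has_traceability", ticket_id_found), ("ticket_id_found", ticket_id_found)]

-- ===== PORT B =====
def check_traceability_alt (gherkin_content : String) : List (String × Bool) :=
  let found := PySem.Str.isIn "@" gherkin_content
      || PySem.Str.isIn "ticket" (PySem.Str.lower gherkin_content)
      || PySem.Str.isIn "QA-" gherkin_content
  [("has_traceability", found), ("ticket_id_found", found)]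

-- ===== PRECONDITION & SPEC =====
def Spec_check_traceability (gherkin_content : String) (out : List (String × Bool)) : Prop := out = check_traceability_alt gherkin_content
instance (gherkin_content : String) (out : List (String × Bool)) : Decidable (Spec_check_traceability gherkin_content out) := by unfold Spec_check_traceability; infer_instance

-- ===== CLAIM (what is proved, stated in full; the proofs are below) =====
def Claim_equal_check_traceability : Prop := ∀ (gherkin_content : String), Dom_check_traceability gherkin_content → Spec_check_traceability gherkin_content (check_traceability gherkin_content)

-- ===== LEMMAS AND PROOFS =====

-- structural form of PySem.Chars.splitOn for a single-character separator
def pvSplitAux (c : Char) : List Char → List Char → List (List Char)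
  | [], cur => [cur.reverse]
  | x :: rest, cur =>
    if x = c then cur.reverse :: pvSplitAux c rest []
    else pvSplitAux c rest (x :: cur)

-- the per-line condition, on List Char
def pvCond (cs : List Char) : Bool :=
  PySem.Chars.isIn "@".toList cs
    || PySem.Chars.isIn "ticket".toList (PySem.Chars.lower cs)
    || PySem.Chars.isIn "QA-".toList cs

-- A's loop at the List Char level
def pvLoopC : List (List Char) → Bool
  | [] => false
  | l :: rest => if pvCond (PySem.Chars.strip l) then true else pvLoopC rest

lemma pvGoSingle (c : Char) :
    ∀ (fuel : Nat) (l cur : List Char) (acc : List (List Char)), l.length < fuel →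
      PySem.Chars.splitOn.go [c] fuel l cur acc = acc.reverse ++ pvSplitAux c l cur := by
  intro fuel
  induction fuel with
  | zero => intro l cur acc h; omega
  | succ fuel ih =>
    intro l cur acc h
    cases l with
    | nil =>
      rw [PySem.Chars.splitOn.go.eq_def]
      simp [pvSplitAux]
    | cons x rest =>
      rw [PySem.Chars.splitOn.go.eq_def]
      by_cases hx : x = c
      · subst hx
        have hp : List.isPrefixOf [x] (x :: rest) = true := by simp [List.isPrefixOf]
        simp only [hp, if_pos, List.length_cons, List.drop_succ_cons, List.length_nil,
          List.drop_zero]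
        rw [ih rest [] (cur.reverse :: acc) (by simpa using Nat.lt_of_succ_lt_succ h)]
        simp [pvSplitAux]
      · have hp : List.isPrefixOf [c] (x :: rest) = false := by
          simp [List.isPrefixOf]
          exact fun hcx => absurd hcx.symm hx
        simp only [hp, Bool.false_eq_true, if_false]
        rw [ih rest (x :: cur) acc (by simpa using Nat.lt_of_succ_lt_succ h)]
        simp [pvSplitAux, hx]

lemma pvSplitOnSingle (c : Char) (l : List Char) :
    PySem.Chars.splitOn l [c] = pvSplitAux c l [] := by
  have := pvGoSingle c (l.length + 1) l [] [] (by omega)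
  simpa [PySem.Chars.splitOn] using this

lemma pvPrefixAppendCons {sub t r : List Char} {c : Char} (hc : c ∉ sub)
    (h : sub <+: t ++ c :: r) : sub <+: t := by
  rcases Nat.lt_or_ge t.length sub.length with hlt | hge
  case inr => exact List.prefix_of_prefix_length_le h (List.prefix_append _ _) hge
  · exfalso
    have hlen : t.length < (t ++ c :: r).length := by simp
    have hpe := h.getElem (i := t.length) (by omega)
    have hg : (t ++ c :: r)[t.length] = c := by
      rw [List.getElem_append_right (Nat.le_refl _)]
      simp
    have hmem : sub[t.length] = c := hpe.trans hg
    exact hc (hmem ▸ List.getElem_mem _)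

lemma pvInfixSplit {sub : List Char} {c : Char} (hne : sub ≠ []) (hc : c ∉ sub) :
    ∀ t r : List Char, (sub <:+: t ++ c :: r ↔ sub <:+: t ∨ sub <:+: r) := by
  intro t r
  constructor
  · induction t with
    | nil =>
      intro h
      rcases List.infix_cons_iff.mp h with hp | hi
      · exfalso
        cases sub with
        | nil => exact hne rfl
        | cons s0 ss =>
          have : s0 = c := (List.cons_prefix_cons.mp hp).1
          exact hc (this ▸ List.mem_cons_self)
      · exact Or.inr hi
    | cons a t ih =>
      intro h
      simp only [List.cons_append] at h
      rcases List.infix_cons_iff.mp h with hp | hi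
      · exact Or.inl (pvPrefixAppendCons (t := a :: t) hc hp).isInfix
      · rcases ih hi with h1 | h2
        · exact Or.inl (List.infix_cons_iff.mpr (Or.inr h1))
        · exact Or.inr h2
  · intro h
    rcases h with h | h
    · exact h.trans (List.prefix_append t (c :: r)).isInfix
    · exact h.trans ((List.suffix_cons c r).trans (List.suffix_append t (c :: r))).isInfix

lemma pvInfixDropWhile {p : Char → Bool} {sub : List Char}
    (hw : ∀ x ∈ sub, p x = false) :
    ∀ {l : List Char}, sub <:+: l → sub <:+: l.dropWhile p := by
  intro l
  induction l with
  | nil => intro h; simpa using h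
  | cons a l ih =>
    intro h
    by_cases hpa : p a = true
    · rw [List.dropWhile_cons_of_pos hpa]
      rcases List.infix_cons_iff.mp h with hp | hi
      · cases sub with
        | nil => exact List.nil_infix
        | cons s0 ss =>
          have h0 : s0 = a := (List.cons_prefix_cons.mp hp).1
          have := hw s0 List.mem_cons_self
          rw [h0, hpa] at this
          exact absurd this (by simp)
      · exact ih hi
    · rw [List.dropWhile_cons_of_neg hpa]
      exact h

lemma pvStripInfix (l : List Char) : PySem.Chars.strip l <:+: l := by
  have h1 : PySem.Chars.lstrip l <:+ l := by
    simpa [PySem.Chars.lstrip] using List.dropWhile_suffix (l := l) PySem.Chars.isspace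
  have h2 : PySem.Chars.strip l <+: PySem.Chars.lstrip l := by
    rw [PySem.Chars.strip, PySem.Chars.rstrip]
    apply List.reverse_suffix.mp
    simpa using List.dropWhile_suffix (l := (PySem.Chars.lstrip l).reverse) PySem.Chars.isspace
  exact h2.isInfix.trans h1.isInfix

lemma pvIsInStrip {sub : List Char} (l : List Char)
    (hw : ∀ x ∈ sub, PySem.Chars.isspace x = false) :
    PySem.Chars.isIn sub (PySem.Chars.strip l) = PySem.Chars.isIn sub l := by
  rw [Bool.eq_iff_iff, PySem.Chars.isIn_iff_infix, PySem.Chars.isIn_iff_infix]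
  constructor
  · intro h; exact h.trans (pvStripInfix l)
  · intro h
    have h1 : sub <:+: PySem.Chars.lstrip l := by
      simpa [PySem.Chars.lstrip] using pvInfixDropWhile hw h
    have h2 : sub.reverse <:+: (PySem.Chars.lstrip l).reverse :=
      List.reverse_infix.mpr h1
    have h3 : sub.reverse <:+: ((PySem.Chars.lstrip l).reverse.dropWhile PySem.Chars.isspace) :=
      pvInfixDropWhile (by intro x hx; exact hw x (List.mem_reverse.mp hx)) h2
    have h4 : sub <:+: ((PySem.Chars.lstrip l).reverse.dropWhile PySem.Chars.isspace).reverse := by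
      have := List.reverse_infix (l₁ := sub)
        (l₂ := ((PySem.Chars.lstrip l).reverse.dropWhile PySem.Chars.isspace).reverse)
      rw [List.reverse_reverse] at this
      exact this.mp h3
    simpa [PySem.Chars.strip, PySem.Chars.rstrip] using h4

lemma pvIsspaceFalse (c : Char) (h1 : 64 < c.toNat) (h2 : c.toNat < 127) :
    PySem.Chars.isspace c = false := by
  unfold PySem.Chars.isspace
  simp only [Bool.or_eq_false_iff, Bool.and_eq_false_iff, decide_eq_false_iff_not]
  omega

lemma pvIsspaceLower (c : Char) :
    PySem.Chars.isspace (PySem.Chars.lowerChar c) = PySem.Chars.isspace c := by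
  unfold PySem.Chars.lowerChar
  by_cases hu : PySem.Chars.isupper c = true
  · rw [if_pos hu]
    have hb : 65 ≤ c.toNat ∧ c.toNat ≤ 90 := by
      unfold PySem.Chars.isupper at hu
      simp only [Bool.and_eq_true, decide_eq_true_eq, Char.le_def] at hu
      exact ⟨hu.1, hu.2⟩
    have hv : (Char.ofNat (c.toNat + 32)).toNat = c.toNat + 32 := by
      rw [Char.toNat_ofNat, if_pos (Or.inl (by omega : c.toNat + 32 < 0xD800))]
    rw [pvIsspaceFalse c (by omega) (by omega),
      pvIsspaceFalse _ (by rw [hv]; omega) (by rw [hv]; omega)]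
  · rw [if_neg hu]

lemma pvLowerStrip (l : List Char) :
    PySem.Chars.lower (PySem.Chars.strip l) = PySem.Chars.strip (PySem.Chars.lower l) := by
  have hcomp : (PySem.Chars.isspace ∘ PySem.Chars.lowerChar) = PySem.Chars.isspace := by
    funext c; exact pvIsspaceLower c
  simp [PySem.Chars.strip, PySem.Chars.lstrip, PySem.Chars.rstrip, PySem.Chars.lower,
    List.dropWhile_map, ← List.map_reverse, hcomp]

lemma pvNoSpaceAt : ∀ x ∈ ("@" : String).toList, PySem.Chars.isspace x = false := by
  rw [show ("@" : String).toList = ['@'] from rfl]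
  intro x hx
  simp only [List.mem_cons, List.not_mem_nil, or_false] at hx
  subst hx; rfl

lemma pvNoSpaceTicket : ∀ x ∈ ("ticket" : String).toList, PySem.Chars.isspace x = false := by
  rw [show ("ticket" : String).toList = ['t', 'i', 'c', 'k', 'e', 't'] from rfl]
  intro x hx
  simp only [List.mem_cons, List.not_mem_nil, or_false] at hx
  rcases hx with rfl | rfl | rfl | rfl | rfl | rfl <;> rfl

lemma pvNoSpaceQA : ∀ x ∈ ("QA-" : String).toList, PySem.Chars.isspace x = false := by
  rw [show ("QA-" : String).toList = ['Q', 'A', '-'] from rfl]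
  intro x hx
  simp only [List.mem_cons, List.not_mem_nil, or_false] at hx
  rcases hx with rfl | rfl | rfl <;> rfl

lemma pvCondStrip (l : List Char) : pvCond (PySem.Chars.strip l) = pvCond l := by
  unfold pvCond
  rw [pvLowerStrip]
  rw [pvIsInStrip l pvNoSpaceAt, pvIsInStrip l pvNoSpaceQA,
    pvIsInStrip (PySem.Chars.lower l) pvNoSpaceTicket]

lemma pvIsInSplit {sub : List Char} (hne : sub ≠ []) (hc : ('\n' : Char) ∉ sub)
    (t r : List Char) :
    PySem.Chars.isIn sub (t ++ '\n' :: r) = (PySem.Chars.isIn sub t || PySem.Chars.isIn sub r) := by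
  rw [Bool.eq_iff_iff]
  simp only [PySem.Chars.isIn_iff_infix, Bool.or_eq_true, PySem.Chars.isIn_iff_infix]
  exact pvInfixSplit hne hc t r

lemma pvCondSplit (t r : List Char) :
    pvCond (t ++ '\n' :: r) = (pvCond t || pvCond r) := by
  unfold pvCond
  have hl : PySem.Chars.lower (t ++ '\n' :: r)
      = PySem.Chars.lower t ++ '\n' :: PySem.Chars.lower r := by
    simp [PySem.Chars.lower, show PySem.Chars.lowerChar '\n' = '\n' from rfl]
  rw [hl, pvIsInSplit (sub := "@".toList) (by simp) (by simp),
    pvIsInSplit (sub := "ticket".toList) (by simp) (by simp),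
    pvIsInSplit (sub := "QA-".toList) (by simp) (by simp)]
  cases PySem.Chars.isIn "@".toList t <;> cases PySem.Chars.isIn "@".toList r <;>
    cases PySem.Chars.isIn "ticket".toList (PySem.Chars.lower t) <;>
    cases PySem.Chars.isIn "ticket".toList (PySem.Chars.lower r) <;>
    cases PySem.Chars.isIn "QA-".toList t <;> cases PySem.Chars.isIn "QA-".toList r <;> rfl

lemma pvMain (cs : List Char) :
    ∀ cur : List Char, pvLoopC (pvSplitAux '\n' cs cur) = pvCond (cur.reverse ++ cs) := by
  induction cs with
  | nil =>
    intro cur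
    simp [pvSplitAux, pvLoopC, pvCondStrip]
  | cons x rest ih =>
    intro cur
    by_cases hx : x = '\n'
    · subst hx
      have hsp : pvSplitAux '\n' ('\n' :: rest) cur = cur.reverse :: pvSplitAux '\n' rest [] := by
        simp [pvSplitAux]
      rw [hsp]
      simp only [pvLoopC]
      rw [pvCondStrip, pvCondSplit]
      rw [show pvLoopC (pvSplitAux '\n' rest []) = pvCond rest by simpa using ih []]
      cases pvCond cur.reverse <;> simp
    · have hsp : pvSplitAux '\n' (x :: rest) cur = pvSplitAux '\n' rest (x :: cur) := by
        simp [pvSplitAux, hx]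
      rw [hsp, ih (x :: cur)]
      simp

lemma pvLoopA_eq (lines : List String) :
    pvLoopA lines = pvLoopC (lines.map String.toList) := by
  induction lines with
  | nil => rfl
  | cons line rest ih =>
    have hc : (PySem.Str.isIn "@" (PySem.Str.strip line)
        || PySem.Str.isIn "ticket" (PySem.Str.lower (PySem.Str.strip line))
        || PySem.Str.isIn "QA-" (PySem.Str.strip line))
        = pvCond (PySem.Chars.strip line.toList) := by
      unfold pvCond
      simp only [PySem.Str.isIn_eq, PySem.Str.toList_strip, PySem.Str.toList_lower]
    simp only [pvLoopA, pvLoopC, List.map_cons]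
    rw [hc, ih]

-- ===== VERDICT (by name: the statement is the Claim_ definition above) =====
theorem check_traceability_spec : Claim_equal_check_traceability := by
  intro g _
  unfold Spec_check_traceability check_traceability check_traceability_alt
  have hsplit : (((PySem.Str.split? g "\n").getD []).map String.toList)
      = PySem.Chars.splitOn g.toList "\n".toList := by
    have h := PySem.Str.split?_map g "\n"
    rw [show PySem.Chars.split? g.toList "\n".toList
        = some (PySem.Chars.splitOn g.toList "\n".toList) from by
      simp [PySem.Chars.split?]]
      at h
    cases hs : PySem.Str.split? g "\n" with
    | none => rw [hs] at h; simp at h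
    | some lines => rw [hs] at h; simpa using h
  have hA : pvLoopA ((PySem.Str.split? g "\n").getD []) = pvCond g.toList := by
    rw [pvLoopA_eq, hsplit, show ("\n" : String).toList = ['\n'] from rfl,
      pvSplitOnSingle]
    simpa using pvMain g.toList []
  have hB : (PySem.Str.isIn "@" g || PySem.Str.isIn "ticket" (PySem.Str.lower g)
      || PySem.Str.isIn "QA-" g) = pvCond g.toList := by
    unfold pvCond
    simp only [PySem.Str.isIn_eq, PySem.Str.toList_lower]
  simp only [hA, hB]
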